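-- pv_equiv track=rewrite | github.com/Zhang-Wen-chao/Computer-Systems | LeetCode/pbdodo/20240908/3.py | get_similar_subarrays
-- ===== SOURCE A (Python) =====
-- from collections import defaultdict
--
-- def get_similar_subarrays(arr, n):
--     count = defaultdict(int)  # 存储子数组频率的出现次数
--     max_len = 0
--
--     # 遍历所有的子数组 [l, r]
--     for l in range(n):
--         freq = [0] * (n + 1)  # 用于统计子数组元素出现次数
--         for r in range(l, n):
--             freq[arr[r]] += 1
--             # 转化为不可变的 tuple 作为哈希的 key
--             freq_tuple = tuple(freq)
--             count[freq_tuple] += 1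
--
--             if count[freq_tuple] > 1:
--                 max_len = max(max_len, r - l + 1)
--
--     return max_len
-- ===== SOURCE B (Python) =====
-- def get_similar_subarrays(arr, n):
--     # group windows by length, longest first; stop at the first length with two
--     # windows sharing a frequency vector
--     for L in range(n, 0, -1):
--         seen = set()
--         found = False
--         for l in range(0, n - L + 1):
--             freq = [0] * (n + 1)
--             for i in range(l, l + L):
--                 freq[arr[i]] += 1
--             t = tuple(freq)
--             if t in seen:
--                 found = True
--                 break
--             seen.add(t)
--         if found:
--             return L
--     return 0
-- ===== Notes on version B (the rewrite author's own statement) =====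
-- stated objective: alternative
-- what changed: Instead of one left-anchored double loop feeding a single global counter dict and tracking a running max, B iterates window lengths from n downward, rebuilds each window's frequency vector fresh, detects a repeat within a per-length set, and returns the first (largest) length with a repeat.
import Mathlib
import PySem

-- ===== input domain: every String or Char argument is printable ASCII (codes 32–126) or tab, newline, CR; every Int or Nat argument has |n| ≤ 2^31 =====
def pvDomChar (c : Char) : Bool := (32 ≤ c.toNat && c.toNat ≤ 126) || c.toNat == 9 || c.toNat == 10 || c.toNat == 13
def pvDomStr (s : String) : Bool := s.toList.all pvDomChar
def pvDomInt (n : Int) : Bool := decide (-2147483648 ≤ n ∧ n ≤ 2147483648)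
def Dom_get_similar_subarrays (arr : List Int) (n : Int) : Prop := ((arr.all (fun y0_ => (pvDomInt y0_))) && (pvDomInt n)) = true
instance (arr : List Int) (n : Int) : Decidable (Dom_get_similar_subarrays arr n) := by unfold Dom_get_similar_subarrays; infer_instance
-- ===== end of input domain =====

-- B regroups the search by window length, longest first, with early exit: an alternative
-- decomposition of the same search, not claimed faster.

-- ===== PORT A =====
-- 'freq[arr[r]] += 1', the line both Pythons share, as a common helper
def pvBump (arr : List Int) (freq : List Int) (i : Int) : List Int :=
  let v := PySem.List.pyGetD arr i 0
  PySem.List.pySetD freq v (PySem.List.pyGetD freq v 0 + 1)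

def get_similar_subarrays (arr : List Int) (n : Int) : Int :=
  ((PySem.List.pyRange 0 n 1).foldl
    (fun (st : PySem.Dict (List Int) Int × Int) l =>
      let inner := (PySem.List.pyRange l n 1).foldl
        (fun (s : PySem.Dict (List Int) Int × Int × List Int) r =>
          let freq := pvBump arr s.2.2 r
          let count := s.1.modify freq 0 (· + 1)
          let maxLen := if count.getD freq 0 > 1 then max s.2.1 (r - l + 1) else s.2.1
          (count, maxLen, freq))
        (st.1, st.2, PySem.List.pyRepeat [(0 : Int)] (n + 1))
      (inner.1, inner.2.1))
    (PySem.Dict.empty, 0)).2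

-- ===== PORT B =====
-- freq = [0]*(n+1); for i in range(l, l+L): freq[arr[i]] += 1
def pvWindowFreq (arr : List Int) (n l L : Int) : List Int :=
  (PySem.List.pyRange l (l + L) 1).foldl (pvBump arr)
    (PySem.List.pyRepeat [(0 : Int)] (n + 1))

-- the inner two loops of B: do two length-L windows share a frequency vector?
def pvHasDupLen (arr : List Int) (n L : Int) : Bool :=
  ((PySem.List.pyRange 0 (n - L + 1) 1).foldl
    (fun (st : Bool × PySem.Set (List Int)) l =>
      if st.1 then st
      else
        let t := pvWindowFreq arr n l L
        if PySem.Set.contains st.2 t then (true, st.2) else (false, PySem.Set.add st.2 t))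
    (false, PySem.Set.empty)).1

def get_similar_subarrays_alt (arr : List Int) (n : Int) : Int :=
  match (PySem.List.pyRange n 0 (-1)).find? (fun L => pvHasDupLen arr n L) with
  | some L => L
  | none => 0

-- ===== PRECONDITION & SPEC =====
-- A raises IndexError when n exceeds len(arr) (arr[r]) or one of the first n values of arr
-- falls outside the valid Python index range [-(n+1), n] of the length-(n+1) freq list
-- (freq[arr[r]]); Pre_ excludes exactly those inputs.
def Pre_get_similar_subarrays (arr : List Int) (n : Int) : Prop :=
  n ≤ (arr.length : Int) ∧ ∀ v ∈ arr.take n.toNat, -(n + 1) ≤ v ∧ v ≤ n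
instance (arr : List Int) (n : Int) : Decidable (Pre_get_similar_subarrays arr n) := by
  unfold Pre_get_similar_subarrays; infer_instance

def pvWitness_get_similar_subarrays : List Int × Int := ([1, 2, 2, 1], 4)

def Spec_get_similar_subarrays (arr : List Int) (n : Int) (out : Int) : Prop := out = get_similar_subarrays_alt arr n
instance (arr : List Int) (n : Int) (out : Int) : Decidable (Spec_get_similar_subarrays arr n out) := by unfold Spec_get_similar_subarrays; infer_instance

-- ===== CLAIM (what is proved, stated in full; the proofs are below) =====
def Claim_equal_get_similar_subarrays : Prop := ∀ (arr : List Int) (n : Int), Dom_get_similar_subarrays arr n → Pre_get_similar_subarrays arr n → Spec_get_similar_subarrays arr n (get_similar_subarrays arr n)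

-- ===== LEMMAS AND PROOFS =====

def pvStep (s : PySem.Dict (List Int) Int × Int) (p : List Int × Int) :
    PySem.Dict (List Int) Int × Int :=
  let c := s.1.modify p.1 0 (· + 1)
  (c, if c.getD p.1 0 > 1 then max s.2 p.2 else s.2)

def pvPairs (arr : List Int) (l : Int) (f : List Int) : List Int → List (List Int × Int)
  | [] => []
  | r :: rs => (pvBump arr f r, r - l + 1) :: pvPairs arr l (pvBump arr f r) rs

lemma pv_inner_flatten (arr : List Int) (l : Int) (rs : List Int) :
    ∀ (c : PySem.Dict (List Int) Int) (m : Int) (f : List Int),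
    rs.foldl
      (fun (s : PySem.Dict (List Int) Int × Int × List Int) r =>
        let freq := pvBump arr s.2.2 r
        let count := s.1.modify freq 0 (· + 1)
        let maxLen := if count.getD freq 0 > 1 then max s.2.1 (r - l + 1) else s.2.1
        (count, maxLen, freq))
      (c, m, f)
    = (((pvPairs arr l f rs).foldl pvStep (c, m)).1,
       ((pvPairs arr l f rs).foldl pvStep (c, m)).2,
       rs.foldl (pvBump arr) f) := by
  induction rs with
  | nil => intro c m f; simp [pvPairs]
  | cons r rs ih =>
    intro c m f
    simp only [List.foldl_cons, pvPairs]
    exact ih _ _ _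

lemma pv_pairs_range (arr : List Int) (z : List Int) (l : Int) :
    ∀ (k : Nat) (m : Int), l ≤ m →
    pvPairs arr l ((PySem.List.pyRange l m 1).foldl (pvBump arr) z)
        (PySem.List.pyRange m (m + (k : Int)) 1)
    = (List.range k).map
        (fun (j : Nat) => ((PySem.List.pyRange l (m + (j : Int) + 1) 1).foldl (pvBump arr) z,
                   m + (j : Int) - l + 1)) := by
  intro k
  induction k with
  | zero =>
    intro m hm
    rw [PySem.List.pyRange_one_eq_nil (a := m) (by push_cast; omega)]
    simp [pvPairs]
  | succ k ih =>
    intro m hm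
    rw [PySem.List.pyRange_one_cons (a := m) (by push_cast; omega)]
    simp only [pvPairs]
    have hfold : pvBump arr ((PySem.List.pyRange l m 1).foldl (pvBump arr) z) m
        = (PySem.List.pyRange l (m + 1) 1).foldl (pvBump arr) z := by
      rw [PySem.List.pyRange_one_succ_right (b := m) hm, List.foldl_append]
      simp
    rw [hfold]
    have h2 : (m + 1) + (k : Int) = m + ((k : Nat) + 1 : Nat) := by push_cast; ring
    have := ih (m + 1) (by omega)
    rw [h2] at this
    rw [this]
    rw [List.range_succ_eq_map]
    simp only [List.map_cons, List.map_map]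
    congr 1
    · norm_num
    · apply List.map_congr_left
      intro j hj
      simp only [Function.comp]
      have h3 : m + 1 + (j : Int) = m + ((j.succ : Nat) : Int) := by push_cast; ring
      rw [h3]

def pvQ (N : Nat) : List (Nat × Nat) :=
  (List.range N).flatMap (fun l => (List.range (N - l)).map (fun j => (l, j)))

def pvKey (arr : List Int) (n : Int) (q : Nat × Nat) : List Int × Int :=
  (pvWindowFreq arr n (q.1 : Int) ((q.2 : Int) + 1), (q.2 : Int) + 1)

lemma pv_A_flatten (arr : List Int) (n : Int) :
    get_similar_subarrays arr n
    = (((pvQ n.toNat).map (pvKey arr n)).foldl pvStep (PySem.Dict.empty, 0)).2 := by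
  unfold get_similar_subarrays
  have hrange : PySem.List.pyRange 0 n 1 = (List.range n.toNat).map (fun (k : Nat) => (k : Int)) := by
    by_cases h : 0 ≤ n
    · have h2 := PySem.List.pyRange_zero_natCast n.toNat
      rw [show ((n.toNat : Nat) : Int) = n by omega] at h2
      exact h2
    · rw [PySem.List.pyRange_one_eq_nil (by omega), show n.toNat = 0 by omega]
      simp
  rw [hrange, List.foldl_map]
  have hstep : ∀ (st : PySem.Dict (List Int) Int × Int), ∀ l' ∈ List.range n.toNat,
      (fun (st : PySem.Dict (List Int) Int × Int) (l : Int) =>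
        let inner := (PySem.List.pyRange l n 1).foldl
          (fun (s : PySem.Dict (List Int) Int × Int × List Int) r =>
            let freq := pvBump arr s.2.2 r
            let count := s.1.modify freq 0 (· + 1)
            let maxLen := if count.getD freq 0 > 1 then max s.2.1 (r - l + 1) else s.2.1
            (count, maxLen, freq))
          (st.1, st.2, PySem.List.pyRepeat [(0 : Int)] (n + 1))
        (inner.1, inner.2.1)) st (l' : Int)
      = ((List.range (n.toNat - l')).map (fun j => pvKey arr n (l', j))).foldl pvStep st := by
    intro st l' hl'
    simp only [List.mem_range] at hl'
    have hln : (l' : Int) ≤ n := by omega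
    simp only
    rw [pv_inner_flatten arr (l' : Int) (PySem.List.pyRange (l' : Int) n 1)]
    have hz : PySem.List.pyRange (l' : Int) (l' : Int) 1 = [] :=
      PySem.List.pyRange_one_eq_nil (by omega)
    have hzfold : PySem.List.pyRepeat [(0 : Int)] (n + 1)
        = (PySem.List.pyRange (l' : Int) (l' : Int) 1).foldl (pvBump arr)
            (PySem.List.pyRepeat [(0 : Int)] (n + 1)) := by
      rw [hz]; rfl
    have hn' : n = (l' : Int) + ((n.toNat - l' : Nat) : Int) := by omega
    have hpairs := pv_pairs_range arr (PySem.List.pyRepeat [(0 : Int)] (n + 1)) (l' : Int)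
        (n.toNat - l') (l' : Int) le_rfl
    rw [← hzfold] at hpairs
    rw [show PySem.List.pyRange (l' : Int) n 1
        = PySem.List.pyRange (l' : Int) ((l' : Int) + ((n.toNat - l' : Nat) : Int)) 1 by rw [← hn']]
    rw [hpairs]
    have hmap : ∀ j ∈ List.range (n.toNat - l'),
        ((PySem.List.pyRange (l' : Int) ((l' : Int) + (j : Int) + 1) 1).foldl (pvBump arr)
            (PySem.List.pyRepeat [(0 : Int)] (n + 1)),
         (l' : Int) + (j : Int) - (l' : Int) + 1)
        = pvKey arr n (l', j) := by
      intro j hj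
      simp only [pvKey, pvWindowFreq, Prod.mk.injEq]
      refine ⟨?_, by ring⟩
      congr 2
    rw [List.map_congr_left hmap]
  conv_rhs => rw [pvQ, List.map_flatMap, List.foldl_flatMap]
  simp only [List.map_map, Function.comp_def]
  congr 1
  apply PySem.List.foldl_congr_mem
  intro acc x hx
  exact hstep acc x hx

lemma pv_step_counter (ks : List (List Int)) (m0 : Int) (p : List Int × Int) :
    pvStep (PySem.Dict.counter ks, m0) p
    = (PySem.Dict.counter (ks ++ [p.1]), if p.1 ∈ ks then max m0 p.2 else m0) := by
  simp only [pvStep]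
  rw [← PySem.Dict.counter_append_singleton]
  congr 1
  rw [PySem.Dict.getD_counter]
  have hc : List.count p.1 (ks ++ [p.1]) = List.count p.1 ks + 1 := by
    rw [List.count_append]; simp
  rw [hc]
  by_cases hmem : p.1 ∈ ks
  · have : 0 < List.count p.1 ks := List.count_pos_iff.mpr hmem
    rw [if_pos (by exact_mod_cast by omega), if_pos hmem]
  · have : List.count p.1 ks = 0 := List.count_eq_zero.mpr hmem
    rw [this]
    rw [if_neg (by norm_num), if_neg hmem]

lemma pv_foldA (ps : List (List Int × Int)) :
    ∀ (ks : List (List Int)) (m0 : Int),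
    m0 ≤ (ps.foldl pvStep (PySem.Dict.counter ks, m0)).2
    ∧ (∀ j (hj : j < ps.length),
        (ps[j].1 ∈ ks ∨ ps[j].1 ∈ (ps.take j).map Prod.fst) →
        ps[j].2 ≤ (ps.foldl pvStep (PySem.Dict.counter ks, m0)).2)
    ∧ ((ps.foldl pvStep (PySem.Dict.counter ks, m0)).2 = m0
       ∨ ∃ j, ∃ (hj : j < ps.length),
          (ps[j].1 ∈ ks ∨ ps[j].1 ∈ (ps.take j).map Prod.fst)
          ∧ (ps.foldl pvStep (PySem.Dict.counter ks, m0)).2 = ps[j].2) := by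
  induction ps with
  | nil => intro ks m0; refine ⟨le_rfl, ?_, Or.inl rfl⟩; intro j hj; simp at hj
  | cons p ps ih =>
    intro ks m0
    rw [List.foldl_cons, pv_step_counter]
    set m0' : Int := if p.1 ∈ ks then max m0 p.2 else m0 with hm0'
    have hle : m0 ≤ m0' := by
      rw [hm0']; split_ifs with h
      · exact le_max_left _ _
      · exact le_rfl
    obtain ⟨ih1, ih2, ih3⟩ := ih (ks ++ [p.1]) m0'
    have hcond : ∀ j (hj : j < ps.length),
        (((p :: ps)[j + 1]'(by simpa using Nat.succ_lt_succ hj)).1 ∈ ks ∨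
          ((p :: ps)[j + 1]'(by simpa using Nat.succ_lt_succ hj)).1 ∈ ((p :: ps).take (j + 1)).map Prod.fst)
        ↔ (ps[j].1 ∈ ks ++ [p.1] ∨ ps[j].1 ∈ (ps.take j).map Prod.fst) := by
      intro j hj
      simp only [List.getElem_cons_succ, List.take_succ_cons, List.map_cons,
        List.mem_cons, List.mem_append]
      tauto
    refine ⟨le_trans hle ih1, ?_, ?_⟩
    · intro j hj hc
      match j with
      | 0 =>
        simp only [List.getElem_cons_zero, List.take_zero, List.map_nil, List.not_mem_nil,
          or_false] at hc
        have : p.2 ≤ m0' := by rw [hm0', if_pos hc]; exact le_max_right _ _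
        exact le_trans this ih1
      | j + 1 =>
        have hj' : j < ps.length := by simpa using hj
        exact ih2 j hj' ((hcond j hj').mp hc)
    · rcases ih3 with h | ⟨j, hj, hc, he⟩
      · rw [h, hm0']
        split_ifs with hmem
        · rcases max_choice m0 p.2 with h2 | h2
          · exact Or.inl h2
          · refine Or.inr ⟨0, by simp, ?_, h2⟩
            simp only [List.getElem_cons_zero, List.take_zero, List.map_nil, List.not_mem_nil,
              or_false]
            exact hmem
        · exact Or.inl rfl
      · refine Or.inr ⟨j + 1, by simpa using Nat.succ_lt_succ hj, ?_, ?_⟩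
        · exact (hcond j hj).mpr hc
        · simpa using he

lemma pv_mem_pvQ (N : Nat) (q : Nat × Nat) :
    q ∈ pvQ N ↔ q.1 < N ∧ q.2 < N - q.1 := by
  unfold pvQ
  simp only [List.mem_flatMap, List.mem_map, List.mem_range]
  constructor
  · rintro ⟨l, hl, j, hj, rfl⟩
    exact ⟨hl, hj⟩
  · rintro ⟨h1, h2⟩
    exact ⟨q.1, h1, q.2, h2, rfl⟩

lemma pv_pvQ_chunks_pairwise (N : Nat) (M : Nat) :
    ((List.range M).flatMap (fun l => (List.range (N - l)).map (fun j => (l, j)))).Pairwise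
      (fun (a b : Nat × Nat) => a.1 < b.1 ∨ (a.1 = b.1 ∧ a.2 < b.2)) := by
  induction M with
  | zero => simp
  | succ M ih =>
    rw [List.range_succ, List.flatMap_append]
    apply List.pairwise_append.mpr
    refine ⟨ih, ?_, ?_⟩
    · simp only [List.flatMap_cons, List.flatMap_nil, List.append_nil]
      apply List.pairwise_map.mpr
      apply List.Pairwise.imp ?_ (List.pairwise_lt_range)
      intro a b hab
      exact Or.inr ⟨rfl, hab⟩
    · intro a ha b hb
      have h1 : a.1 < M := by
        simp only [List.mem_flatMap, List.mem_map, List.mem_range] at ha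
        obtain ⟨l, hl, j, hj, rfl⟩ := ha
        exact hl
      have h2 : b.1 = M := by
        simp only [List.flatMap_cons, List.flatMap_nil, List.append_nil, List.mem_map,
          List.mem_range] at hb
        obtain ⟨j, hj, rfl⟩ := hb
        rfl
      omega

lemma pv_pvQ_pairwise (N : Nat) :
    (pvQ N).Pairwise (fun a b => a.1 < b.1 ∨ (a.1 = b.1 ∧ a.2 < b.2)) :=
  pv_pvQ_chunks_pairwise N N

lemma pv_mem_append_lt {α : Type} (xs ys : List α) (x y : α) (hx : x ∈ xs) (hy : y ∈ ys) :
    ∃ i j, i < j ∧ ∃ (hi : i < (xs ++ ys).length) (hj : j < (xs ++ ys).length),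
      (xs ++ ys)[i]'hi = x ∧ (xs ++ ys)[j]'hj = y := by
  obtain ⟨i, hi, hxi⟩ := List.mem_iff_getElem.mp hx
  obtain ⟨j, hj, hyj⟩ := List.mem_iff_getElem.mp hy
  refine ⟨i, xs.length + j, by omega, by simp; omega, by simp; omega, ?_, ?_⟩
  · rw [List.getElem_append_left hi]
    exact hxi
  · rw [List.getElem_append_right (by omega)]
    simpa using hyj

lemma pv_pvQ_before (N : Nat) (l1 j1 l2 j2 : Nat) (h : l1 < l2)
    (h1 : (l1, j1) ∈ pvQ N) (h2 : (l2, j2) ∈ pvQ N) :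
    ∃ i j, i < j ∧ ∃ (hi : i < (pvQ N).length) (hj : j < (pvQ N).length),
      (pvQ N)[i]'hi = (l1, j1) ∧ (pvQ N)[j]'hj = (l2, j2) := by
  have hsplit : pvQ N
      = ((List.range l2).flatMap (fun l => (List.range (N - l)).map (fun j => (l, j))))
        ++ ((List.range (N - l2)).map (fun x => l2 + x)).flatMap
            (fun l => (List.range (N - l)).map (fun j => (l, j))) := by
    have hl2 : l2 ≤ N := by
      have := (pv_mem_pvQ N (l2, j2)).mp h2
      omega
    unfold pvQ
    rw [← List.flatMap_append, ← List.range_add]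
    rw [show l2 + (N - l2) = N by omega]
  rw [hsplit]
  apply pv_mem_append_lt
  · have hm1 := (pv_mem_pvQ N (l1, j1)).mp h1
    simp only [List.mem_flatMap, List.mem_map, List.mem_range]
    exact ⟨l1, h, j1, by simp at hm1; omega, rfl⟩
  · have hm2 := (pv_mem_pvQ N (l2, j2)).mp h2
    simp only [List.mem_flatMap, List.mem_map, List.mem_range]
    refine ⟨l2, ⟨0, by simp at hm2; omega, by omega⟩, j2, by simp at hm2; omega, rfl⟩

lemma pv_sum_set (xs : List Int) (k : Nat) (h : k < xs.length) (v : Int) :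
    (xs.set k v).sum = xs.sum - xs[k] + v := by
  induction xs generalizing k with
  | nil => simp at h
  | cons x xs ih =>
    cases k with
    | zero => simp [List.set]; ring
    | succ k =>
      simp only [List.set, List.sum_cons, List.getElem_cons_succ]
      rw [ih k (by simpa using h)]
      ring

lemma pv_bump_spec (f : List Int) (v x : Int) (h : PySem.Raise.InRange f.length v) :
    (PySem.List.pySetD f v x).sum = f.sum - PySem.List.pyGetD f v 0 + x
    ∧ (PySem.List.pySetD f v x).length = f.length := by
  obtain ⟨h1, h2⟩ := h
  by_cases h0 : 0 ≤ v
  · have hidx : PySem.List.pyIdx? f.length v = some v.toNat := by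
      simp only [PySem.List.pyIdx?, if_pos h0, if_pos h2]
    have hklt : v.toNat < f.length := by omega
    simp only [PySem.List.pySetD, PySem.List.pySet?, PySem.List.pyGetD, PySem.List.pyGet?,
      hidx, Option.map_some, Option.getD_some, Option.bind_some]
    rw [pv_sum_set f v.toNat hklt x]
    simp [List.getElem?_eq_getElem hklt]
  · have hvneg : v < 0 := by omega
    have hklt : f.length - (-v).toNat < f.length := by omega
    have hidx : PySem.List.pyIdx? f.length v = some (f.length - (-v).toNat) := by
      simp only [PySem.List.pyIdx?, if_neg h0, if_pos h1]
    simp only [PySem.List.pySetD, PySem.List.pySet?, PySem.List.pyGetD, PySem.List.pyGet?,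
      hidx, Option.map_some, Option.getD_some, Option.bind_some]
    rw [pv_sum_set f _ hklt x]
    simp [List.getElem?_eq_getElem hklt]

lemma pv_window_sum_len (arr : List Int) (n : Int)
    (hpre : Pre_get_similar_subarrays arr n) :
    ∀ (L l : Nat), l + L ≤ n.toNat →
    (pvWindowFreq arr n (l : Int) (L : Int)).sum = (L : Int)
    ∧ (pvWindowFreq arr n (l : Int) (L : Int)).length = (n + 1).toNat := by
  obtain ⟨hlen, hvals⟩ := hpre
  intro L
  induction L with
  | zero =>
    intro l hl
    unfold pvWindowFreq
    rw [PySem.List.pyRange_one_eq_nil (by omega)]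
    rw [PySem.List.pyRepeat_singleton]
    simp
  | succ L ih =>
    intro l hl
    have hN : l + L < n.toNat := by omega
    have hn0 : 0 < n := by omega
    unfold pvWindowFreq at ih ⊢
    rw [show (l : Int) + ((L + 1 : Nat) : Int) = ((l : Int) + (L : Nat)) + 1 by push_cast; ring]
    rw [PySem.List.pyRange_one_succ_right (by omega), List.foldl_append, List.foldl_cons,
      List.foldl_nil]
    obtain ⟨ihs, ihl⟩ := ih l (by omega)
    set f := (PySem.List.pyRange (l : Int) ((l : Int) + (L : Nat)) 1).foldl (pvBump arr)
      (PySem.List.pyRepeat [(0 : Int)] (n + 1)) with hf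
    have hidx : ((l : Int) + (L : Nat)) = ((l + L : Nat) : Int) := by push_cast; ring
    have hv : PySem.List.pyGetD arr ((l : Int) + (L : Nat)) 0 = arr[l + L]'(by omega) := by
      rw [hidx, PySem.List.pyGetD_natCast]
      exact List.getD_eq_getElem arr 0 (by omega)
    have hmem : arr[l + L]'(by omega) ∈ arr.take n.toNat := by
      have hlt : l + L < (arr.take n.toNat).length := by
        rw [List.length_take]
        omega
      have : (arr.take n.toNat)[l + L]'hlt = arr[l + L]'(by omega) := List.getElem_take
      rw [← this]
      exact List.getElem_mem hlt
    have hrange := hvals _ hmem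
    have hInR : PySem.Raise.InRange f.length (PySem.List.pyGetD arr ((l : Int) + (L : Nat)) 0) := by
      rw [ihl, hv]
      constructor <;> [skip; skip] <;> omega
    have hb := pv_bump_spec f (PySem.List.pyGetD arr ((l : Int) + (L : Nat)) 0)
      (PySem.List.pyGetD f (PySem.List.pyGetD arr ((l : Int) + (L : Nat)) 0) 0 + 1) hInR
    unfold pvBump
    constructor
    · rw [hb.1, ihs]
      push_cast
      ring
    · rw [hb.2, ihl]

def pvDup (arr : List Int) (n : Int) (L : Nat) : Prop :=
  ∃ l1 l2 : Nat, l1 < l2 ∧ l2 + L ≤ n.toNat ∧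
    pvWindowFreq arr n (l1 : Int) (L : Int) = pvWindowFreq arr n (l2 : Int) (L : Int)

lemma pv_counter_nil : PySem.Dict.counter ([] : List (List Int)) = PySem.Dict.empty := rfl

lemma pv_A_ge (arr : List Int) (n : Int) (L : Nat) (h1 : 1 ≤ L) (hd : pvDup arr n L) :
    (L : Int) ≤ get_similar_subarrays arr n := by
  obtain ⟨l1, l2, hlt, hle, heq⟩ := hd
  rw [pv_A_flatten, ← pv_counter_nil]
  have hm1 : (l1, L - 1) ∈ pvQ n.toNat := (pv_mem_pvQ _ _).mpr ⟨by omega, by omega⟩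
  have hm2 : (l2, L - 1) ∈ pvQ n.toNat := (pv_mem_pvQ _ _).mpr ⟨by omega, by omega⟩
  obtain ⟨i, j, hij, hi, hj, hqi, hqj⟩ := pv_pvQ_before n.toNat l1 (L - 1) l2 (L - 1) hlt hm1 hm2
  set P := (pvQ n.toNat).map (pvKey arr n) with hP
  have hPlen : P.length = (pvQ n.toNat).length := by rw [hP, List.length_map]
  have hPj : P[j]'(by omega) = pvKey arr n (l2, L - 1) := by
    simp only [hP, List.getElem_map, hqj]
  have hPi : P[i]'(by omega) = pvKey arr n (l1, L - 1) := by
    simp only [hP, List.getElem_map, hqi]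
  have hcast : ((L - 1 : Nat) : Int) + 1 = (L : Int) := by omega
  have hkeyeq : (pvKey arr n (l1, L - 1)).1 = (pvKey arr n (l2, L - 1)).1 := by
    simp only [pvKey, hcast]
    exact heq
  have hcond : (P[j]'(by omega)).1 ∈ (P.take j).map Prod.fst := by
    apply List.mem_map.mpr
    refine ⟨P[i]'(by omega), ?_, ?_⟩
    · have hlt' : i < (P.take j).length := by
        rw [List.length_take]
        omega
      have : (P.take j)[i]'hlt' = P[i]'(by omega) := List.getElem_take
      rw [← this]
      exact List.getElem_mem hlt'
    · rw [hPi, hPj, hkeyeq]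
  have := ((pv_foldA P [] 0).2.1) j (by omega) (Or.inr hcond)
  have hPj2 : (P[j]'(by omega)).2 = (L : Int) := by rw [hPj]; simp only [pvKey]; exact hcast
  rw [hPj2] at this
  exact this

lemma pv_A_cases (arr : List Int) (n : Int) (hpre : Pre_get_similar_subarrays arr n) :
    get_similar_subarrays arr n = 0
    ∨ ∃ L : Nat, 1 ≤ L ∧ pvDup arr n L ∧ get_similar_subarrays arr n = (L : Int) := by
  rw [pv_A_flatten, ← pv_counter_nil]
  set P := (pvQ n.toNat).map (pvKey arr n) with hP
  rcases (pv_foldA P [] 0).2.2 with h0 | ⟨j, hj, hc, he⟩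
  · exact Or.inl h0
  · rcases hc with hin | hin
    · simp at hin
    · right
      obtain ⟨y, hy, hyeq⟩ := List.mem_map.mp hin
      obtain ⟨i, hi, hyi⟩ := List.mem_iff_getElem.mp hy
      have hi' : i < j := by
        have := List.length_take_le j P
        have h2 : i < min j P.length := by rw [← List.length_take]; omega
        omega
      have hilen : i < P.length := by omega
      have htk : (P.take j)[i]'hi = P[i]'hilen := List.getElem_take
      have hkey : (P[i]'hilen).1 = (P[j]'hj).1 := by rw [← htk, hyi, hyeq]
      have hQlen : P.length = (pvQ n.toNat).length := by rw [hP, List.length_map]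
      have hilen2 : i < (pvQ n.toNat).length := by omega
      have hjlen2 : j < (pvQ n.toNat).length := by omega
      obtain ⟨li, ji, hqieq⟩ : ∃ li ji, (pvQ n.toNat)[i]'hilen2 = (li, ji) := ⟨_, _, rfl⟩
      obtain ⟨lj, jj, hqjeq⟩ : ∃ lj jj, (pvQ n.toNat)[j]'hjlen2 = (lj, jj) := ⟨_, _, rfl⟩
      have hPi : P[i]'hilen = pvKey arr n (li, ji) := by
        simp only [hP, List.getElem_map, hqieq]
      have hPj : P[j]'hj = pvKey arr n (lj, jj) := by
        simp only [hP, List.getElem_map, hqjeq]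
      have hmi : (li, ji) ∈ pvQ n.toNat := by rw [← hqieq]; exact List.getElem_mem _
      have hmj : (lj, jj) ∈ pvQ n.toNat := by rw [← hqjeq]; exact List.getElem_mem _
      have hbi := (pv_mem_pvQ _ (li, ji)).mp hmi
      have hbj := (pv_mem_pvQ _ (lj, jj)).mp hmj
      simp only at hbi hbj
      -- equal keys: equal window vectors
      have hw : pvWindowFreq arr n (li : Int) ((ji : Int) + 1)
          = pvWindowFreq arr n (lj : Int) ((jj : Int) + 1) := by
        have h2 := hkey
        rw [hPi, hPj] at h2
        exact h2
      -- sums give equal lengths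
      have hsi := (pv_window_sum_len arr n hpre (ji + 1) li (by omega)).1
      have hsj := (pv_window_sum_len arr n hpre (jj + 1) lj (by omega)).1
      have hci : ((ji + 1 : Nat) : Int) = (ji : Int) + 1 := by push_cast; ring
      have hcj : ((jj + 1 : Nat) : Int) = (jj : Int) + 1 := by push_cast; ring
      rw [hci] at hsi
      rw [hcj] at hsj
      have hLeq : ji = jj := by
        have h3 : ((ji : Int)) + 1 = (jj : Int) + 1 := by
          rw [← hsi, ← hsj, hw]
        omega
      -- lexicographic order gives li < lj
      have hpw := List.pairwise_iff_getElem.mp (pv_pvQ_pairwise n.toNat) i j hilen2 hjlen2 hi'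
      rw [hqieq, hqjeq] at hpw
      simp only at hpw
      have hl12 : li < lj := by
        rcases hpw with h3 | ⟨_, h3⟩
        · exact h3
        · omega
      refine ⟨jj + 1, by omega, ⟨li, lj, hl12, by omega, ?_⟩, ?_⟩
      · rw [hcj]
        subst hLeq
        exact hw
      · rw [he, hPj]
        simp only [pvKey]
        omega

-- once the flag is true the scan never changes state

lemma pv_scan_true (ts : List (List Int)) (s : PySem.Set (List Int)) :
    ts.foldl
      (fun (st : Bool × PySem.Set (List Int)) t =>
        if st.1 then st
        else if PySem.Set.contains st.2 t then (true, st.2) else (false, PySem.Set.add st.2 t))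
      (true, s) = (true, s) := by
  induction ts with
  | nil => rfl
  | cons t ts ih => simpa using ih

lemma pv_dupScan (ts : List (List Int)) :
    ∀ (seen : List (List Int)), seen.Nodup →
    ((ts.foldl
      (fun (st : Bool × PySem.Set (List Int)) t =>
        if st.1 then st
        else if PySem.Set.contains st.2 t then (true, st.2) else (false, PySem.Set.add st.2 t))
      (false, seen)).1 = true
    ↔ ¬ (seen ++ ts).Nodup) := by
  induction ts with
  | nil =>
    intro seen hs
    simpa using hs
  | cons t ts ih =>
    intro seen hs
    rw [List.foldl_cons]
    simp only [if_neg (by simp : ¬ (false = true))]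
    by_cases hc : PySem.Set.contains seen t
    · rw [if_pos hc, pv_scan_true]
      have hmem : t ∈ seen := by
        simpa [PySem.Set.contains, List.contains_iff_mem] using hc
      simp only [true_iff]
      intro hnd
      have := List.disjoint_of_nodup_append hnd
      exact this hmem (by simp)
    · rw [if_neg hc]
      have hmem : t ∉ seen := by
        simpa [PySem.Set.contains, List.contains_iff_mem] using hc
      have hadd : PySem.Set.add seen t = seen ++ [t] := by
        unfold PySem.Set.add
        rw [if_neg hc]
      rw [hadd]
      have hnd' : (seen ++ [t]).Nodup := by
        rw [List.nodup_append]
        refine ⟨hs, List.nodup_singleton t, ?_⟩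
        intro a ha b hb
        rw [List.mem_singleton] at hb
        subst hb
        exact fun h => hmem (h ▸ ha)
      rw [ih (seen ++ [t]) hnd']
      rw [List.append_assoc]
      simp

lemma pv_range_natCast (m : Int) :
    PySem.List.pyRange 0 m 1 = (List.range m.toNat).map (fun (k : Nat) => (k : Int)) := by
  by_cases h : 0 ≤ m
  · have h2 := PySem.List.pyRange_zero_natCast m.toNat
    rw [show ((m.toNat : Nat) : Int) = m by omega] at h2
    exact h2
  · rw [PySem.List.pyRange_one_eq_nil (by omega), show m.toNat = 0 by omega]
    simp

lemma pv_hasDupLen_iff (arr : List Int) (n : Int) (L : Nat) (h1 : 1 ≤ L) (hL : (L : Int) ≤ n) :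
    pvHasDupLen arr n (L : Int) = true ↔ pvDup arr n L := by
  unfold pvHasDupLen
  rw [pv_range_natCast, List.foldl_map,
    ← List.foldl_map (f := fun (k : Nat) => pvWindowFreq arr n (k : Int) (L : Int))
      (g := fun (st : Bool × PySem.Set (List Int)) t =>
        if st.1 then st
        else if PySem.Set.contains st.2 t then (true, st.2) else (false, PySem.Set.add st.2 t))]
  set ts := (List.range (n - (L : Int) + 1).toNat).map
    (fun (k : Nat) => pvWindowFreq arr n (k : Int) (L : Int)) with hts
  rw [pv_dupScan ts PySem.Set.empty List.nodup_nil]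
  show ¬ ts.Nodup ↔ pvDup arr n L
  have hlen : ts.length = (n - (L : Int) + 1).toNat := by
    rw [hts, List.length_map, List.length_range]
  rw [List.nodup_iff_getElem?_ne_getElem?]
  push_neg
  constructor
  · rintro ⟨i, j, hij, hjlen, heq⟩
    refine ⟨i, j, hij, ?_, ?_⟩
    · omega
    · have h2 : ts[i]? = some (pvWindowFreq arr n (i : Int) (L : Int)) := by
        rw [hts]
        rw [List.getElem?_map]
        rw [List.getElem?_range (by omega)]
        rfl
      have h3 : ts[j]? = some (pvWindowFreq arr n (j : Int) (L : Int)) := by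
        rw [hts]
        rw [List.getElem?_map]
        rw [List.getElem?_range (by omega)]
        rfl
      rw [h2, h3] at heq
      exact Option.some_injective _ heq
  · rintro ⟨l1, l2, hlt, hle, heq⟩
    refine ⟨l1, l2, hlt, by omega, ?_⟩
    have h2 : ts[l1]? = some (pvWindowFreq arr n (l1 : Int) (L : Int)) := by
      rw [hts, List.getElem?_map, List.getElem?_range (by omega)]
      rfl
    have h3 : ts[l2]? = some (pvWindowFreq arr n (l2 : Int) (L : Int)) := by
      rw [hts, List.getElem?_map, List.getElem?_range (by omega)]
      rfl
    rw [h2, h3, heq]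

lemma pv_desc_eq (n : Int) :
    PySem.List.pyRange n 0 (-1) = (List.range n.toNat).map (fun (k : Nat) => n - (k : Int)) := by
  rw [PySem.List.pyRange_neg_one, show n - 0 = n from by ring]

lemma pv_desc_getElem (n : Int) (k : Nat) (hk : k < n.toNat) :
    (PySem.List.pyRange n 0 (-1))[k]'(by
      rw [pv_desc_eq, List.length_map, List.length_range]; exact hk) = n - (k : Int) := by
  simp only [pv_desc_eq, List.getElem_map, List.getElem_range]

lemma pv_B_cases (arr : List Int) (n : Int) :
    get_similar_subarrays_alt arr n = 0
    ∨ ∃ L : Nat, 1 ≤ L ∧ pvDup arr n L ∧ get_similar_subarrays_alt arr n = (L : Int) := by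
  rcases hfind : (PySem.List.pyRange n 0 (-1)).find? (fun L => pvHasDupLen arr n L) with _ | L
  · simp only [get_similar_subarrays_alt, hfind]
    exact Or.inl trivial
  · simp only [get_similar_subarrays_alt, hfind]
    right
    have hp : pvHasDupLen arr n L = true := List.find?_some hfind
    have hmem : L ∈ PySem.List.pyRange n 0 (-1) := List.mem_of_find?_eq_some hfind
    have hbound := (PySem.List.mem_pyRange_neg_one).mp hmem
    have hLpos : 0 < L := hbound.1
    have hLn : L ≤ n := hbound.2
    refine ⟨L.toNat, by omega, ?_, by omega⟩
    have hcast : ((L.toNat : Nat) : Int) = L := by omega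
    apply (pv_hasDupLen_iff arr n L.toNat (by omega) (by omega)).mp
    rw [hcast]
    exact hp

lemma pv_B_ge (arr : List Int) (n : Int) (L : Nat) (h1 : 1 ≤ L) (hd : pvDup arr n L) :
    (L : Int) ≤ get_similar_subarrays_alt arr n := by
  have hLN : L ≤ n.toNat := by
    obtain ⟨l1, l2, hlt, hle, _⟩ := hd
    omega
  have hLn : (L : Int) ≤ n := by omega
  have hp : pvHasDupLen arr n (L : Int) = true :=
    (pv_hasDupLen_iff arr n L h1 hLn).mpr hd
  rcases hfind : (PySem.List.pyRange n 0 (-1)).find? (fun L => pvHasDupLen arr n L) with _ | L'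
  · simp only [get_similar_subarrays_alt, hfind]
    exfalso
    have hmem : (L : Int) ∈ PySem.List.pyRange n 0 (-1) :=
      (PySem.List.mem_pyRange_neg_one).mpr ⟨by omega, hLn⟩
    have := List.find?_eq_none.mp hfind _ hmem
    rw [hp] at this
    exact this rfl
  · simp only [get_similar_subarrays_alt, hfind]
    by_contra hcon
    push_neg at hcon
    obtain ⟨hpL', i, hi, hgot, hbefore⟩ := List.find?_eq_some_iff_getElem.mp hfind
    have hlen : (PySem.List.pyRange n 0 (-1)).length = n.toNat := by
      rw [pv_desc_eq, List.length_map, List.length_range]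
    set k0 : Nat := (n - (L : Int)).toNat with hk0
    have hk0lt : k0 < n.toNat := by omega
    have hk0v : (PySem.List.pyRange n 0 (-1))[k0]'(by omega) = (L : Int) := by
      rw [pv_desc_getElem n k0 hk0lt]
      omega
    have hiv : (PySem.List.pyRange n 0 (-1))[i]'hi = n - (i : Int) := by
      rw [pv_desc_getElem n i (by omega)]
    have hL' : L' = n - (i : Int) := by rw [← hgot, hiv]
    have hk0i : k0 < i := by omega
    have := hbefore k0 hk0i
    rw [hk0v] at this
    rw [hp] at this
    simp at this

-- ===== VERDICT (by name: the statement is the Claim_ definition above) =====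
theorem get_similar_subarrays_spec : Claim_equal_get_similar_subarrays := by
  intro arr n _hdom hpre
  unfold Spec_get_similar_subarrays
  have hA := pv_A_cases arr n hpre
  have hB := pv_B_cases arr n
  rcases hA with hA0 | ⟨LA, hLA1, hLAd, hLAe⟩
  · rcases hB with hB0 | ⟨LB, hLB1, hLBd, hLBe⟩
    · rw [hA0, hB0]
    · exfalso
      have := pv_A_ge arr n LB hLB1 hLBd
      omega
  · rcases hB with hB0 | ⟨LB, hLB1, hLBd, hLBe⟩
    · exfalso
      have := pv_B_ge arr n LA hLA1 hLAd
      omega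
    · have h1 := pv_A_ge arr n LB hLB1 hLBd
      have h2 := pv_B_ge arr n LA hLA1 hLAd
      omega
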